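-- pv_equiv track=rewrite | github.com/nyucel/blm2010 | 180401104.py | xiToplam
-- ===== SOURCE A (Python) =====
-- def xiToplam(n):
--     xKareToplam = []
--     for j in range(1,13,1):
--         xKare = 0
--         for i in range(n):
--             xKare += (i+1)**j
--         xKareToplam.append(xKare)
--     xKareToplam.insert(0,n)
--     return xKareToplam
-- ===== SOURCE B (Python) =====
-- def xiToplam(n):
--     m = n if n > 0 else 0
--     return [
--         n,
--         (m**2 + m) // 2,
--         (2*m**3 + 3*m**2 + m) // 6,
--         (m**4 + 2*m**3 + m**2) // 4,
--         (6*m**5 + 15*m**4 + 10*m**3 - m) // 30,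
--         (2*m**6 + 6*m**5 + 5*m**4 - m**2) // 12,
--         (6*m**7 + 21*m**6 + 21*m**5 - 7*m**3 + m) // 42,
--         (3*m**8 + 12*m**7 + 14*m**6 - 7*m**4 + 2*m**2) // 24,
--         (10*m**9 + 45*m**8 + 60*m**7 - 42*m**5 + 20*m**3 - 3*m) // 90,
--         (2*m**10 + 10*m**9 + 15*m**8 - 14*m**6 + 10*m**4 - 3*m**2) // 20,
--         (6*m**11 + 33*m**10 + 55*m**9 - 66*m**7 + 66*m**5 - 33*m**3 + 5*m) // 66,
--         (2*m**12 + 12*m**11 + 22*m**10 - 33*m**8 + 44*m**6 - 33*m**4 + 10*m**2) // 24,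
--         (210*m**13 + 1365*m**12 + 2730*m**11 - 5005*m**9 + 8580*m**7 - 9009*m**5 + 4550*m**3 - 691*m) // 2730,
--     ]
-- ===== Notes on version B (the rewrite author's own statement) =====
-- stated objective: faster
-- what changed: Replaced A's per-exponent loops summing i**j over range(n) with Faulhaber closed-form power-sum polynomials evaluated once, so B does a constant number of arithmetic operations instead of O(n) loop iterations.
import Mathlib
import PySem

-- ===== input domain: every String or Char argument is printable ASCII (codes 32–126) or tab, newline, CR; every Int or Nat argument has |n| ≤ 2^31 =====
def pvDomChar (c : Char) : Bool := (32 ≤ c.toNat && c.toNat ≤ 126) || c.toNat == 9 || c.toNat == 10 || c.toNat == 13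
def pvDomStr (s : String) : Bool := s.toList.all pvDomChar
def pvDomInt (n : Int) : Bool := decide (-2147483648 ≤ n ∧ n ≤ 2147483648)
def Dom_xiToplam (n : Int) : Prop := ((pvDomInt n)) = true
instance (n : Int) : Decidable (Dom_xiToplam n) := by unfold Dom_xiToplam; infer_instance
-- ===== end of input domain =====

-- B replaces A's O(n) loops over range(n) by Faulhaber closed-form power-sum polynomials (O(1)); timing label per the check.

-- ===== PORT A =====
def xiToplam (n : Int) : List Int :=
  let xKareToplam : List Int :=
    (PySem.List.pyRange 1 13 1).foldl (fun acc j =>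
      acc ++ [(PySem.List.pyRange 0 n 1).foldl (fun xKare i => xKare + (i + 1) ^ j.toNat) 0]) []
  PySem.List.insert xKareToplam 0 n

-- ===== PORT B =====
def xiToplam_alt (n : Int) : List Int :=
  let m : Int := if n > 0 then n else 0
  [ n,
    PySem.Int.floordiv (m^2 + m) 2,
    PySem.Int.floordiv (2*m^3 + 3*m^2 + m) 6,
    PySem.Int.floordiv (m^4 + 2*m^3 + m^2) 4,
    PySem.Int.floordiv (6*m^5 + 15*m^4 + 10*m^3 - m) 30,
    PySem.Int.floordiv (2*m^6 + 6*m^5 + 5*m^4 - m^2) 12,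
    PySem.Int.floordiv (6*m^7 + 21*m^6 + 21*m^5 - 7*m^3 + m) 42,
    PySem.Int.floordiv (3*m^8 + 12*m^7 + 14*m^6 - 7*m^4 + 2*m^2) 24,
    PySem.Int.floordiv (10*m^9 + 45*m^8 + 60*m^7 - 42*m^5 + 20*m^3 - 3*m) 90,
    PySem.Int.floordiv (2*m^10 + 10*m^9 + 15*m^8 - 14*m^6 + 10*m^4 - 3*m^2) 20,
    PySem.Int.floordiv (6*m^11 + 33*m^10 + 55*m^9 - 66*m^7 + 66*m^5 - 33*m^3 + 5*m) 66,
    PySem.Int.floordiv (2*m^12 + 12*m^11 + 22*m^10 - 33*m^8 + 44*m^6 - 33*m^4 + 10*m^2) 24,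
    PySem.Int.floordiv (210*m^13 + 1365*m^12 + 2730*m^11 - 5005*m^9 + 8580*m^7 - 9009*m^5 + 4550*m^3 - 691*m) 2730 ]

-- ===== PRECONDITION & SPEC =====
def Spec_xiToplam (n : Int) (out : List Int) : Prop := out = xiToplam_alt n
instance (n : Int) (out : List Int) : Decidable (Spec_xiToplam n out) := by unfold Spec_xiToplam; infer_instance

-- ===== CLAIM (what is proved, stated in full; the proofs are below) =====
def Claim_equal_xiToplam : Prop := ∀ (n : Int), Dom_xiToplam n → Spec_xiToplam n (xiToplam n)

-- ===== LEMMAS AND PROOFS =====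

-- the inner loop of A: sum of (i+1)^k over range(n)
def sumPow (n : Int) (k : Nat) : Int :=
  (PySem.List.pyRange 0 n 1).foldl (fun xKare i => xKare + (i + 1) ^ k) 0

lemma sumPow_nonpos {n : Int} (h : n ≤ 0) (k : Nat) : sumPow n k = 0 := by
  unfold sumPow
  rw [PySem.List.pyRange_one_eq_nil h]
  rfl

lemma sumPow_succ (n : Int) (h : 0 ≤ n) (k : Nat) :
    sumPow (n + 1) k = sumPow n k + (n + 1) ^ k := by
  unfold sumPow
  rw [PySem.List.pyRange_one_succ_right h, List.foldl_append]
  rfl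

lemma sumPow_eq_floordiv (k : Nat) (d : Int) (P : Int → Int) (hd : 0 < d)
    (h0 : P 0 = 0) (hstep : ∀ x : Int, P x + d * (x + 1) ^ k = P (x + 1)) :
    ∀ n : Int, 0 ≤ n → sumPow n k = PySem.Int.floordiv (P n) d := by
  have key : ∀ n : Int, 0 ≤ n → d * sumPow n k = P n := by
    intro n hn
    induction n, hn using Int.le_induction with
    | base => rw [sumPow_nonpos le_rfl k, h0]; ring
    | succ x hx ih =>
        rw [sumPow_succ x hx k, mul_add, ih, hstep]
  intro n hn
  rw [← key n hn, PySem.Int.floordiv_eq_ediv_of_pos hd,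
    Int.mul_ediv_cancel_left _ (by omega : d ≠ 0)]

lemma xiToplam_eq_sumPow (n : Int) :
    xiToplam n = [n, sumPow n 1, sumPow n 2, sumPow n 3, sumPow n 4, sumPow n 5,
      sumPow n 6, sumPow n 7, sumPow n 8, sumPow n 9, sumPow n 10, sumPow n 11, sumPow n 12] := by
  have hr : PySem.List.pyRange 1 13 1 = [1, 2, 3, 4, 5, 6, 7, 8, 9, 10, 11, 12] := by decide
  unfold xiToplam
  rw [hr]
  simp only [List.foldl_cons, List.foldl_nil, List.nil_append, List.cons_append,
    PySem.List.insert_zero]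
  norm_num [sumPow]
  exact ⟨rfl, rfl, rfl, rfl, rfl, rfl, rfl, rfl, rfl, rfl, rfl⟩

-- ===== VERDICT (by name: the statement is the Claim_ definition above) =====
theorem xiToplam_spec : Claim_equal_xiToplam := by
  intro n _
  unfold Spec_xiToplam
  rw [xiToplam_eq_sumPow]
  unfold xiToplam_alt
  by_cases h : n > 0
  · simp only [h, if_pos]
    have hn : (0:Int) ≤ n := le_of_lt h
    rw [sumPow_eq_floordiv 1 2 (fun m => m^2 + m) (by norm_num) (by norm_num) (fun x => by ring) n hn,
        sumPow_eq_floordiv 2 6 (fun m => 2*m^3 + 3*m^2 + m) (by norm_num) (by norm_num) (fun x => by ring) n hn,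
        sumPow_eq_floordiv 3 4 (fun m => m^4 + 2*m^3 + m^2) (by norm_num) (by norm_num) (fun x => by ring) n hn,
        sumPow_eq_floordiv 4 30 (fun m => 6*m^5 + 15*m^4 + 10*m^3 - m) (by norm_num) (by norm_num) (fun x => by ring) n hn,
        sumPow_eq_floordiv 5 12 (fun m => 2*m^6 + 6*m^5 + 5*m^4 - m^2) (by norm_num) (by norm_num) (fun x => by ring) n hn,
        sumPow_eq_floordiv 6 42 (fun m => 6*m^7 + 21*m^6 + 21*m^5 - 7*m^3 + m) (by norm_num) (by norm_num) (fun x => by ring) n hn,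
        sumPow_eq_floordiv 7 24 (fun m => 3*m^8 + 12*m^7 + 14*m^6 - 7*m^4 + 2*m^2) (by norm_num) (by norm_num) (fun x => by ring) n hn,
        sumPow_eq_floordiv 8 90 (fun m => 10*m^9 + 45*m^8 + 60*m^7 - 42*m^5 + 20*m^3 - 3*m) (by norm_num) (by norm_num) (fun x => by ring) n hn,
        sumPow_eq_floordiv 9 20 (fun m => 2*m^10 + 10*m^9 + 15*m^8 - 14*m^6 + 10*m^4 - 3*m^2) (by norm_num) (by norm_num) (fun x => by ring) n hn,
        sumPow_eq_floordiv 10 66 (fun m => 6*m^11 + 33*m^10 + 55*m^9 - 66*m^7 + 66*m^5 - 33*m^3 + 5*m) (by norm_num) (by norm_num) (fun x => by ring) n hn,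
        sumPow_eq_floordiv 11 24 (fun m => 2*m^12 + 12*m^11 + 22*m^10 - 33*m^8 + 44*m^6 - 33*m^4 + 10*m^2) (by norm_num) (by norm_num) (fun x => by ring) n hn,
        sumPow_eq_floordiv 12 2730 (fun m => 210*m^13 + 1365*m^12 + 2730*m^11 - 5005*m^9 + 8580*m^7 - 9009*m^5 + 4550*m^3 - 691*m) (by norm_num) (by norm_num) (fun x => by ring) n hn]
  · have hn : n ≤ 0 := by omega
    simp only [h, if_false]
    norm_num [sumPow_nonpos hn]
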